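-- pv_equiv track=rewrite | github.com/jahirnstu14/Cp_with_Python | CP_Algorithm_basic_algebra/Spoj/14. Spoj LCMSUM - LCM Sum.py | precal
-- ===== SOURCE A (Python) =====
-- def precal(n):
--     phi = list(range(n + 1))
--     res = [0] * (n + 1)
--
--     for i in range(2, n + 1):
--         if phi[i] == i:
--             for j in range(i, n + 1, i):
--                 phi[j] //= i
--                 phi[j] *= (i - 1)
--
--     for i in range(1, n + 1):
--         for j in range(i, n + 1, i):
--             res[j] += i * phi[i]
--
--     return res
-- ===== SOURCE B (Python) =====
-- def precal(n):
--     # smallest-prime-factor sieve, then phi by the multiplicative recurrence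
--     # phi[m] = phi[m//p] * (p if p divides m//p else p - 1) with p = spf[m],
--     # then the same divisor-sum accumulation for res.
--     spf = list(range(n + 1))
--     for p in range(2, n + 1):
--         if spf[p] == p:
--             for q in range(p * p, n + 1, p):
--                 if spf[q] == q:
--                     spf[q] = p
--     phi = [0] * (n + 1)
--     if n >= 1:
--         phi[1] = 1
--     for m in range(2, n + 1):
--         p = spf[m]
--         r = m // p
--         phi[m] = phi[r] * p if spf[r] == p else phi[r] * (p - 1)
--     res = [0] * (n + 1)
--     for i in range(1, n + 1):
--         t = i * phi[i]
--         for j in range(i, n + 1, i):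
--             res[j] += t
--     return res
-- ===== Notes on version B (the rewrite author's own statement) =====
-- stated objective: alternative
-- what changed: phi is computed by a smallest-prime-factor sieve plus the O(1)-per-element multiplicative recurrence phi[m]=phi[m//p]*(p or p-1), instead of A's in-place divide-and-multiply totient sieve over every prime's multiples; the divisor-sum accumulation stays.
import Mathlib
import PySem

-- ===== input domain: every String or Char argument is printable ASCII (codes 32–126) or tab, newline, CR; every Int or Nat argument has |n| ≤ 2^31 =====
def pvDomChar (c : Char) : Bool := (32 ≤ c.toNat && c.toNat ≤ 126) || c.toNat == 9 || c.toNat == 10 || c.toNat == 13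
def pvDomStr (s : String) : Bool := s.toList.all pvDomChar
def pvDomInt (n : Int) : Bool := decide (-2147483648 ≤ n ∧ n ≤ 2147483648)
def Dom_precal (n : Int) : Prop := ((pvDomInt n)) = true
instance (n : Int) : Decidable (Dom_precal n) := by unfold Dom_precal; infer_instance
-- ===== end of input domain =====

-- B replaces A's in-place divide-and-multiply totient sieve by a smallest-prime-factor sieve
-- plus the multiplicative recurrence phi[m] = phi[m//p] * (p if p divides m//p else p-1);
-- the divisor-sum accumulation phase is unchanged (objective: alternative algorithm).

-- ===== PORT A =====
-- phase 1 of A: the in-place totient sieve (phi[i]==i detects primes; phi[j] //= i; phi[j] *= i-1)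

def precalPhi (n : Int) : List Int :=
  (PySem.List.pyRange 2 (n+1) 1).foldl (fun phi i =>
    if PySem.List.pyGetD phi i 0 == i then
      (PySem.List.pyRange i (n+1) i).foldl (fun phi j =>
        let phi1 := PySem.List.pySetD phi j (PySem.Int.floordiv (PySem.List.pyGetD phi j 0) i)
        PySem.List.pySetD phi1 j (PySem.List.pyGetD phi1 j 0 * (i-1))) phi
    else phi) (PySem.List.pyRange 0 (n+1) 1)


def precal (n : Int) : List Int :=
  let phi := precalPhi n
  (PySem.List.pyRange 1 (n+1) 1).foldl (fun res i =>
    (PySem.List.pyRange i (n+1) i).foldl (fun res j =>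
      PySem.List.pySetD res j (PySem.List.pyGetD res j 0 + i * PySem.List.pyGetD phi i 0)) res)
    (List.replicate (n+1).toNat (0:Int))

-- ===== PORT B =====
-- phase 1 of B: smallest-prime-factor sieve

def precalAltSpf (n : Int) : List Int :=
  (PySem.List.pyRange 2 (n+1) 1).foldl (fun spf p =>
    if PySem.List.pyGetD spf p 0 == p then
      (PySem.List.pyRange (p*p) (n+1) p).foldl (fun spf q =>
        if PySem.List.pyGetD spf q 0 == q then PySem.List.pySetD spf q p else spf) spf
    else spf) (PySem.List.pyRange 0 (n+1) 1)

-- phase 2 of B: phi by the multiplicative recurrence phi[m] = phi[m//p] * (p | p-1), p = spf[m]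

def precalAltPhi (n : Int) : List Int :=
  let spf := precalAltSpf n
  let phi0 := List.replicate (n+1).toNat (0:Int)
  let phi1 := if 1 ≤ n then PySem.List.pySetD phi0 1 1 else phi0
  (PySem.List.pyRange 2 (n+1) 1).foldl (fun phi m =>
    let p := PySem.List.pyGetD spf m 0
    let r := PySem.Int.floordiv m p
    PySem.List.pySetD phi m
      (if PySem.List.pyGetD spf r 0 == p then PySem.List.pyGetD phi r 0 * p
       else PySem.List.pyGetD phi r 0 * (p-1))) phi1


def precal_alt (n : Int) : List Int :=
  let phi := precalAltPhi n
  (PySem.List.pyRange 1 (n+1) 1).foldl (fun res i =>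
    let t := i * PySem.List.pyGetD phi i 0
    (PySem.List.pyRange i (n+1) i).foldl (fun res j =>
      PySem.List.pySetD res j (PySem.List.pyGetD res j 0 + t)) res)
    (List.replicate (n+1).toNat (0:Int))





-- ===== PRECONDITION & SPEC =====
def Spec_precal (n : Int) (out : List Int) : Prop := out = precal_alt n
instance (n : Int) (out : List Int) : Decidable (Spec_precal n out) := by unfold Spec_precal; infer_instance

-- ===== CLAIM (what is proved, stated in full; the proofs are below) =====
def Claim_equal_precal : Prop := ∀ (n : Int), Dom_precal n → Spec_precal n (precal n)

-- ===== LEMMAS AND PROOFS =====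

def pvPk (k j : ℕ) : ℕ := ∏ p ∈ j.primeFactors.filter (fun p => p ≤ k), p

def pvQk (k j : ℕ) : ℕ := ∏ p ∈ j.primeFactors.filter (fun p => p ≤ k), (p - 1)

def pvNfk (k j : ℕ) : ℕ := j / pvPk k j * pvQk k j

def pvNf (j : ℕ) : ℕ := j / (∏ p ∈ j.primeFactors, p) * ∏ p ∈ j.primeFactors, (p - 1)

lemma pvPk_dvd (k j : ℕ) : pvPk k j ∣ j :=
  dvd_trans (Finset.prod_dvd_prod_of_subset _ _ _ (Finset.filter_subset _ _)) (Nat.prod_primeFactors_dvd j)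

lemma coprime_pvPk {p : ℕ} (k j : ℕ) (hp : p.Prime) (hk : k < p) : Nat.Coprime p (pvPk k j) := by
  apply Nat.Coprime.prod_right
  intro q hq
  simp only [Finset.mem_filter, Nat.mem_primeFactors] at hq
  exact (Nat.coprime_primes hp hq.1.1).mpr (by omega)


lemma pvNfk_step_prime {i j : ℕ} (hp : i.Prime) (hij : i ∣ j) (hj : j ≠ 0) :
    pvNfk (i-1) j / i * (i-1) = pvNfk i j := by
  have h2 := hp.two_le
  have hins : j.primeFactors.filter (fun p => p ≤ i) =
      insert i (j.primeFactors.filter (fun p => p ≤ i - 1)) := by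
    ext p
    simp only [Finset.mem_insert, Finset.mem_filter, Nat.mem_primeFactors]
    constructor
    · rintro ⟨h1, h3⟩
      by_cases hpi : p = i
      · left; exact hpi
      · right; exact ⟨h1, by omega⟩
    · rintro (h1 | ⟨h1, h3⟩)
      · subst h1; exact ⟨⟨hp, hij, hj⟩, le_refl _⟩
      · exact ⟨h1, by omega⟩
  have hnot : i ∉ j.primeFactors.filter (fun p => p ≤ i - 1) := by
    simp only [Finset.mem_filter]
    rintro ⟨-, h⟩; omega
  have hP : pvPk i j = i * pvPk (i-1) j := by
    rw [pvPk, hins, Finset.prod_insert hnot]; rfl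
  have hQ : pvQk i j = (i-1) * pvQk (i-1) j := by
    rw [pvQk, hins, Finset.prod_insert hnot]; rfl
  have hPd : pvPk (i-1) j ∣ j := pvPk_dvd _ _
  have hco : Nat.Coprime i (pvPk (i-1) j) := coprime_pvPk _ _ hp (by omega)
  have hidvd : i ∣ j / pvPk (i-1) j := by
    refine hco.dvd_of_dvd_mul_right ?_
    rw [Nat.div_mul_cancel hPd]
    exact hij
  obtain ⟨m, hm⟩ := hidvd
  have hkey : j / pvPk i j = m := by
    rw [hP, mul_comm i, ← Nat.div_div_eq_div_mul, hm, Nat.mul_div_cancel_left _ hp.pos]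
  rw [pvNfk, pvNfk, hm, hkey, hQ, mul_assoc, Nat.mul_div_cancel_left _ hp.pos]
  ring


lemma pvNfk_step_skip {k j : ℕ} (h : ¬((k+1).Prime ∧ (k+1) ∣ j)) :
    pvNfk (k+1) j = pvNfk k j := by
  have hf : j.primeFactors.filter (fun p => p ≤ k + 1) = j.primeFactors.filter (fun p => p ≤ k) := by
    ext p
    simp only [Finset.mem_filter, Nat.mem_primeFactors]
    constructor
    · rintro ⟨h1, h2⟩
      refine ⟨h1, ?_⟩
      by_cases hpk : p = k + 1
      · exact absurd ⟨hpk ▸ h1.1, hpk ▸ h1.2.1⟩ h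
      · omega
    · rintro ⟨h1, h2⟩; exact ⟨h1, by omega⟩
  rw [pvNfk, pvNfk, pvPk, pvQk, pvPk, pvQk, hf]

lemma pvPk_pos (k j : ℕ) : 0 < pvPk k j := by
  apply Finset.prod_pos
  intro p hp
  simp only [Finset.mem_filter, Nat.mem_primeFactors] at hp
  exact hp.1.1.pos


lemma pvNfk_cond {i : ℕ} (h2 : 2 ≤ i) : pvNfk (i-1) i = i ↔ i.Prime := by
  constructor
  · intro h
    by_contra hnp
    have hq := Nat.minFac_prime (show i ≠ 1 by omega)
    have hqd := Nat.minFac_dvd i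
    have hqne : i.minFac ≠ i := fun he => hnp (Nat.prime_def_minFac.mpr ⟨h2, he⟩)
    have hqle : i.minFac ≤ i := Nat.minFac_le (by omega)
    have hmem : i.minFac ∈ i.primeFactors.filter (fun p => p ≤ i - 1) := by
      simp only [Finset.mem_filter, Nat.mem_primeFactors]
      exact ⟨⟨hq, hqd, by omega⟩, by omega⟩
    have hlt : pvQk (i-1) i < pvPk (i-1) i := by
      apply Finset.prod_lt_prod_of_nonempty
      · intro p hp
        simp only [Finset.mem_filter, Nat.mem_primeFactors] at hp
        have := hp.1.1.two_le; omega
      · intro p hp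
        simp only [Finset.mem_filter, Nat.mem_primeFactors] at hp
        have := hp.1.1.two_le; omega
      · exact ⟨_, hmem⟩
    have hPd := pvPk_dvd (i-1) i
    have hpos : 0 < i / pvPk (i-1) i :=
      Nat.div_pos (Nat.le_of_dvd (by omega) hPd) (pvPk_pos _ _)
    have : pvNfk (i-1) i < i / pvPk (i-1) i * pvPk (i-1) i :=
      (Nat.mul_lt_mul_left hpos).mpr hlt
    rw [Nat.div_mul_cancel hPd] at this
    omega
  · intro hp
    have hf : i.primeFactors.filter (fun p => p ≤ i - 1) = ∅ := by
      refine Finset.filter_false_of_mem ?_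
      intro p hpm
      rw [Nat.Prime.primeFactors hp, Finset.mem_singleton] at hpm
      omega
    simp [pvNfk, pvPk, pvQk, hf]


lemma pvNfk_full {k j : ℕ} (hjk : j ≤ k) : pvNfk k j = pvNf j := by
  have hf : j.primeFactors.filter (fun p => p ≤ k) = j.primeFactors := by
    refine Finset.filter_true_of_mem ?_
    intro p hp
    simp only [Nat.mem_primeFactors] at hp
    exact le_trans (Nat.le_of_dvd (Nat.pos_of_ne_zero hp.2.2) hp.2.1) hjk
  rw [pvNfk, pvNf, pvPk, pvQk, hf]


lemma primeFactors_div_minFac_dvd {m : ℕ} (h2 : 2 ≤ m) (hd : m.minFac ∣ m / m.minFac) :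
    (m / m.minFac).primeFactors = m.primeFactors := by
  have hq := Nat.minFac_prime (show m ≠ 1 by omega)
  have hr : m / m.minFac ≠ 0 := by
    have := Nat.div_pos (Nat.minFac_le (by omega)) hq.pos
    omega
  ext p
  simp only [Nat.mem_primeFactors]
  constructor
  · rintro ⟨h1, h3, -⟩
    exact ⟨h1, h3.trans (Nat.div_dvd_of_dvd (Nat.minFac_dvd m)), by omega⟩
  · rintro ⟨h1, h3, -⟩
    refine ⟨h1, ?_, hr⟩
    by_cases hpq : p = m.minFac
    · exact hpq ▸ hd
    · have hmul : m = m.minFac * (m / m.minFac) := (Nat.mul_div_cancel' (Nat.minFac_dvd m)).symm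
      have : p ∣ m.minFac * (m / m.minFac) := hmul ▸ h3
      exact (Nat.Coprime.dvd_of_dvd_mul_left ((Nat.coprime_primes h1 hq).mpr hpq) this)


lemma pvNf_rec_dvd {m : ℕ} (h2 : 2 ≤ m) (hd : m.minFac ∣ m / m.minFac) :
    pvNf m = pvNf (m / m.minFac) * m.minFac := by
  have hq := Nat.minFac_prime (show m ≠ 1 by omega)
  have hPf := primeFactors_div_minFac_dvd h2 hd
  have hPd : (∏ p ∈ (m / m.minFac).primeFactors, p) ∣ m / m.minFac := Nat.prod_primeFactors_dvd _
  obtain ⟨c, hc⟩ := hPd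
  rw [hPf] at hc
  rw [pvNf, pvNf, hPf]
  set P := ∏ p ∈ m.primeFactors, p with hPdef
  set Q := ∏ p ∈ m.primeFactors, (p - 1) with hQdef
  set f := m.minFac with hfdef
  have hP0 : 0 < P := by
    rw [hPdef]
    apply Finset.prod_pos
    intro p hp
    exact ((Nat.mem_primeFactors.mp hp).1).pos
  have hm : m = P * (f * c) := by
    have h := (Nat.mul_div_cancel' (Nat.minFac_dvd m)).symm
    rw [hc] at h
    conv_lhs => rw [h]
    ring
  have hmP : m / P = f * c := by
    conv_lhs => rw [hm]
    rw [Nat.mul_div_cancel_left _ hP0]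
  rw [hmP, hc, Nat.mul_div_cancel_left _ hP0]
  ring


lemma pvNf_rec_ndvd {m : ℕ} (h2 : 2 ≤ m) (hd : ¬ m.minFac ∣ m / m.minFac) :
    pvNf m = pvNf (m / m.minFac) * (m.minFac - 1) := by
  have hq := Nat.minFac_prime (show m ≠ 1 by omega)
  have hr0 : m / m.minFac ≠ 0 := by
    have := Nat.div_pos (Nat.minFac_le (by omega)) hq.pos
    omega
  have hnotin : m.minFac ∉ (m / m.minFac).primeFactors := by
    simp only [Nat.mem_primeFactors]
    rintro ⟨-, h3, -⟩; exact hd h3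
  have hins : m.primeFactors = insert m.minFac ((m / m.minFac).primeFactors) := by
    ext p
    simp only [Finset.mem_insert, Nat.mem_primeFactors]
    constructor
    · rintro ⟨h1, h3, -⟩
      by_cases hpq : p = m.minFac
      · left; exact hpq
      · right
        refine ⟨h1, ?_, hr0⟩
        have hmul : m = m.minFac * (m / m.minFac) := (Nat.mul_div_cancel' (Nat.minFac_dvd m)).symm
        exact Nat.Coprime.dvd_of_dvd_mul_left ((Nat.coprime_primes h1 hq).mpr hpq) (hmul ▸ h3)
    · rintro (h1 | ⟨h1, h3, -⟩)
      · exact ⟨h1 ▸ hq, h1 ▸ Nat.minFac_dvd m, by omega⟩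
      · exact ⟨h1, h3.trans (Nat.div_dvd_of_dvd (Nat.minFac_dvd m)), by omega⟩
  have hPd : (∏ p ∈ (m / m.minFac).primeFactors, p) ∣ m / m.minFac := Nat.prod_primeFactors_dvd _
  obtain ⟨c, hc⟩ := hPd
  rw [pvNf, pvNf, hins, Finset.prod_insert hnotin, Finset.prod_insert hnotin]
  set P := ∏ p ∈ (m / m.minFac).primeFactors, p with hPdef
  set Q := ∏ p ∈ (m / m.minFac).primeFactors, (p - 1) with hQdef
  set f := m.minFac with hfdef
  have hP0 : 0 < P := by
    rw [hPdef]
    apply Finset.prod_pos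
    intro p hp
    exact ((Nat.mem_primeFactors.mp hp).1).pos
  have hm : m = (f * P) * c := by
    have h := (Nat.mul_div_cancel' (Nat.minFac_dvd m)).symm
    rw [hc] at h
    conv_lhs => rw [h]
    ring
  have hmP : m / (f * P) = c := by
    conv_lhs => rw [hm]
    rw [Nat.mul_div_cancel_left _ (Nat.mul_pos hq.pos hP0)]
  rw [hmP, hc, Nat.mul_div_cancel_left _ hP0]
  ring


lemma pvGet_map_range (g : ℕ → ℤ) (N : ℕ) (i : ℤ) (h0 : 0 ≤ i) (h1 : i < N) :
    PySem.List.pyGetD ((List.range N).map g) i 0 = g i.toNat := by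
  have hlen : ((List.range N).map g).length = N := by simp
  rw [PySem.List.pyGetD_eq_getElem _ 0 h0 (by rw [hlen]; exact h1)]
  have hi : i.toNat < N := by omega
  simp [hi]


lemma pvSet_map_range (g : ℕ → ℤ) (N : ℕ) (i : ℤ) (v : ℤ) (h0 : 0 ≤ i) (h1 : i < N) :
    PySem.List.pySetD ((List.range N).map g) i v =
      (List.range N).map (fun k => if k = i.toNat then v else g k) := by
  rw [PySem.List.pySetD_of_nonneg _ v h0]
  apply List.ext_getElem
  · simp
  · intro k hk1 hk2
    simp only [List.length_set, List.length_map, List.length_range] at hk1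
    rw [List.getElem_set]
    simp [hk1]
    split_ifs with h h' h'
    · rfl
    · omega
    · omega
    · rfl


lemma pvNodup_pyRange_pos (a b s : ℤ) (hs : 0 < s) : (PySem.List.pyRange a b s).Nodup := by
  rw [PySem.List.pyRange_of_pos a b hs]
  refine List.Nodup.map ?_ (List.nodup_range)
  intro x y hxy
  simp only [] at hxy
  have h2 : s * (x:ℤ) = s * (y:ℤ) := by omega
  have := mul_left_cancel₀ (by omega : (s:ℤ) ≠ 0) h2
  exact_mod_cast this


lemma pvFold_set_map (body : List Int → Int → List Int) (f : Int → Int → Int) (N : ℕ)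
    (hbody : ∀ (g : ℕ → ℤ) (j : ℤ), 0 ≤ j → j < N →
      body ((List.range N).map g) j = PySem.List.pySetD ((List.range N).map g) j (f j (g j.toNat))) :
    ∀ (l : List Int) (g : ℕ → ℤ), l.Nodup → (∀ j ∈ l, 0 ≤ j ∧ j < N) →
      l.foldl body ((List.range N).map g) =
        (List.range N).map (fun (k : ℕ) => if (k : ℤ) ∈ l then f (k : ℤ) (g k) else g k) := by
  intro l
  induction l with
  | nil =>
    intro g _ _
    simp
  | cons j t ih =>
    intro g hnd hb
    obtain ⟨hj0, hjN⟩ := hb j (List.mem_cons_self)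
    rw [List.foldl_cons, hbody g j hj0 hjN, pvSet_map_range g N j _ hj0 hjN,
      ih _ (List.nodup_cons.mp hnd).2 (fun x hx => hb x (List.mem_cons_of_mem _ hx))]
    apply List.map_congr_left
    intro k hk
    rw [List.mem_range] at hk
    by_cases hkj' : k = j.toNat
    · subst hkj'
      have hkj : ((j.toNat : ℕ) : ℤ) = j := Int.toNat_of_nonneg hj0
      have hkt : ((j.toNat : ℕ) : ℤ) ∉ t := by rw [hkj]; exact (List.nodup_cons.mp hnd).1
      rw [if_neg hkt, if_pos rfl, if_pos (by rw [hkj]; exact List.mem_cons_self), hkj]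
    · have hkj : (k : ℤ) ≠ j := by omega
      rw [if_neg hkj']
      by_cases hkt : (k : ℤ) ∈ t
      · rw [if_pos hkt, if_pos (List.mem_cons_of_mem _ hkt)]
      · rw [if_neg hkt, if_neg (by
          rw [List.mem_cons]
          rintro (h | h)
          · exact hkj h
          · exact hkt h)]


lemma pvMem_pyRange_mult (i b x : ℤ) (hi : 0 < i) :
    x ∈ PySem.List.pyRange i b i ↔ i ∣ x ∧ i ≤ x ∧ x < b := by
  rw [PySem.List.mem_pyRange_iff_of_pos hi]
  have hiff : i ∣ x - i ↔ i ∣ x :=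
    ⟨fun h => by have := dvd_add h (dvd_refl i); simpa using this,
     fun h => dvd_sub h (dvd_refl i)⟩
  constructor
  · rintro ⟨h1, h2, h3⟩
    exact ⟨hiff.mp h3, h1, h2⟩
  · rintro ⟨h1, h2, h3⟩
    exact ⟨h2, h3, hiff.mpr h1⟩
lemma pvNfk_one (j : ℕ) : pvNfk 1 j = j := by
  have h : j.primeFactors.filter (fun p => p ≤ 1) = ∅ := by
    refine Finset.filter_false_of_mem ?_
    intro p hp
    have := (Nat.mem_primeFactors.mp hp).1.two_le
    omega
  simp [pvNfk, pvPk, pvQk, h]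

lemma pvNfk_zero (k : ℕ) : pvNfk k 0 = 0 := by
  simp [pvNfk]

lemma pvSet_set (L : List ℤ) (j a b : ℤ) (h0 : 0 ≤ j) :
    PySem.List.pySetD (PySem.List.pySetD L j a) j b = PySem.List.pySetD L j b := by
  rw [PySem.List.pySetD_of_nonneg _ a h0, PySem.List.pySetD_of_nonneg _ b h0,
    PySem.List.pySetD_of_nonneg _ b h0]
  exact List.set_set ..

lemma pvGet_set_same (L : List ℤ) (j a : ℤ) (h0 : 0 ≤ j) (h1 : j < L.length) :
    PySem.List.pyGetD (PySem.List.pySetD L j a) j 0 = a := by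
  rw [PySem.List.pySetD_of_nonneg _ a h0,
    PySem.List.pyGetD_eq_getElem _ 0 h0 (by simpa using h1)]
  exact List.getElem_set_self (by simp; omega)

lemma pvAPhase (nn : ℕ) : ∀ K, 1 ≤ K → K ≤ nn →
    (PySem.List.pyRange 2 ((K:ℤ)+1) 1).foldl (fun phi i =>
      if PySem.List.pyGetD phi i 0 == i then
        (PySem.List.pyRange i ((nn:ℤ)+1) i).foldl (fun phi j =>
          let phi1 := PySem.List.pySetD phi j (PySem.Int.floordiv (PySem.List.pyGetD phi j 0) i)
          PySem.List.pySetD phi1 j (PySem.List.pyGetD phi1 j 0 * (i-1))) phi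
      else phi) ((List.range (nn+1)).map (fun (j : ℕ) => (j : ℤ)))
    = (List.range (nn+1)).map (fun j => ((pvNfk K j : ℤ))) := by
  intro K
  induction K with
  | zero => omega
  | succ K ih =>
    intro h1 hK
    by_cases hK1 : 1 ≤ K
    case neg =>
      have hK0 : K = 0 := by omega
      subst hK0
      rw [PySem.List.pyRange_one_eq_nil (by norm_num)]
      rw [List.foldl_nil]
      apply List.map_congr_left
      intro k hk
      simp only [Nat.zero_add]
      rw [pvNfk_one]
    case pos =>
      have hcast : ((K+1 : ℕ) : ℤ) + 1 = ((K:ℤ)+1) + 1 := by push_cast; ring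
      rw [hcast]
      rw [PySem.List.pyRange_one_succ_right (a := 2) (b := (K:ℤ)+1) (by omega), List.foldl_append,
        ih hK1 (by omega), List.foldl_cons, List.foldl_nil]
      set i' : ℕ := K + 1 with hi'
      have hiz : ((K:ℤ)+1) = ((i' : ℕ) : ℤ) := by omega
      rw [hiz]
      have hi2 : 2 ≤ i' := by omega
      have hiN : ((i' : ℕ) : ℤ) < ((nn+1 : ℕ) : ℤ) := by push_cast; omega
      have htn : ((i' : ℤ)).toNat = i' := by omega
      have hgc : PySem.List.pyGetD ((List.range (nn+1)).map (fun j => ((pvNfk K j : ℕ) : ℤ))) (i' : ℤ) 0 = ((pvNfk K i' : ℕ) : ℤ) := by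
        simpa [htn] using pvGet_map_range (fun j => ((pvNfk K j : ℤ))) (nn+1) (i' : ℤ) (by omega) (by push_cast; omega)
      have hcond : pvNfk (i' - 1) i' = i' ↔ i'.Prime := pvNfk_cond hi2
      have hsub : i' - 1 = K := by omega
      rw [hsub] at hcond
      by_cases hpr : i'.Prime
      · have hc : (PySem.List.pyGetD ((List.range (nn+1)).map (fun j => ((pvNfk K j : ℤ)))) (i' : ℤ) 0 == ((i' : ℕ) : ℤ)) = true := by
          rw [hgc, beq_iff_eq]
          exact_mod_cast hcond.mpr hpr
        rw [if_pos hc]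
        rw [pvFold_set_map _ (fun j v => PySem.Int.floordiv v (i' : ℤ) * ((i' : ℤ)-1)) (nn+1)
          (by
            intro g j hj0 hjN
            simp only []
            have hlen : ((List.range (nn+1)).map g).length = nn + 1 := by simp
            rw [pvGet_map_range g _ _ hj0 hjN,
              pvGet_set_same _ _ _ hj0 (by rw [hlen]; exact_mod_cast hjN),
              pvSet_set _ _ _ _ hj0])
          _ _ (pvNodup_pyRange_pos _ _ _ (by omega))
          (by
            intro j hj
            rw [pvMem_pyRange_mult _ _ _ (by omega)] at hj
            push_cast
            omega)]
        apply List.map_congr_left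
        intro k hk
        rw [List.mem_range] at hk
        simp only [pvMem_pyRange_mult _ _ _ (show (0:ℤ) < (i':ℤ) by omega)]
        split_ifs with hmem
        · obtain ⟨hdvd, hle, -⟩ := hmem
          have hdvdN : i' ∣ k := by exact_mod_cast hdvd
          have hk0 : k ≠ 0 := by
            rintro rfl
            omega
          have hstep := pvNfk_step_prime hpr hdvdN hk0
          rw [hsub] at hstep
          rw [PySem.Int.floordiv_natCast]
          have : ((i' : ℤ) - 1) = ((i' - 1 : ℕ) : ℤ) := by omega
          rw [this, ← Nat.cast_mul, ← hstep, hsub]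
        · push_neg at hmem
          by_cases hk0 : k = 0
          · subst hk0
            simp [pvNfk_zero]
          · have hnd : ¬ (i' ∣ k) := by
              intro hd
              have h5 : (i' : ℤ) ∣ (k : ℤ) := by exact_mod_cast hd
              have h6 : i' ≤ k := Nat.le_of_dvd (by omega) hd
              have := hmem h5 (by exact_mod_cast h6)
              push_cast at this
              omega
            have := pvNfk_step_skip (j := k) (k := K) (by
              rw [← hi']
              rintro ⟨-, hd⟩
              exact hnd hd)
            rw [hi', this]
      · have hc : (PySem.List.pyGetD ((List.range (nn+1)).map (fun j => ((pvNfk K j : ℤ)))) (i' : ℤ) 0 == ((i' : ℕ) : ℤ)) = false := by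
          rw [hgc, beq_eq_false_iff_ne]
          intro he
          exact hpr (hcond.mp (by exact_mod_cast he))
        rw [if_neg (by rw [hc]; simp)]
        apply List.map_congr_left
        intro k hk
        have := pvNfk_step_skip (j := k) (k := K) (by rintro ⟨hp, -⟩; exact hpr (by rw [hi']; exact hp))
        rw [hi', this]

def pvSv (k j : ℕ) : ℕ := if j.minFac ≤ k ∧ j.minFac * j.minFac ≤ j then j.minFac else j
def pvBg (k j : ℕ) : ℕ := if 1 ≤ j ∧ j ≤ k then pvNf j else 0

lemma pvNf_zero : pvNf 0 = 0 := by simp [pvNf]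
lemma pvNf_one : pvNf 1 = 1 := by simp [pvNf]

lemma pvSv_one (j : ℕ) : pvSv 1 j = j := by
  rcases Nat.lt_or_ge j 2 with hj | hj
  · interval_cases j <;> simp [pvSv, Nat.minFac_one, Nat.minFac_zero]
  · have h2 : 2 ≤ j.minFac := (Nat.minFac_prime (by omega)).two_le
    unfold pvSv
    rw [if_neg (by omega)]

lemma pvSv_final {j nn : ℕ} (h1 : 1 ≤ j) (h2 : j ≤ nn) : pvSv nn j = j.minFac := by
  unfold pvSv
  split_ifs with h
  · rfl
  · by_cases hj1 : j = 1
    · subst hj1; rw [Nat.minFac_one]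
    · by_cases hpr : j.Prime
      · exact ((Nat.prime_def_minFac.mp hpr).2).symm
      · exfalso
        have hsq := Nat.minFac_sq_le_self (by omega) hpr
        rw [pow_two] at hsq
        have hle : j.minFac ≤ j := Nat.minFac_le (by omega)
        exact h ⟨by omega, hsq⟩

lemma pvSv_cond {K i : ℕ} (hi : i = K + 1) (h2 : 2 ≤ i) : pvSv K i = i ↔ i.Prime := by
  constructor
  · intro h
    by_contra hpr
    have hne : i.minFac ≠ i := fun he => hpr (Nat.prime_def_minFac.mpr ⟨h2, he⟩)
    have hle : i.minFac ≤ i := Nat.minFac_le (by omega)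
    have hsq := Nat.minFac_sq_le_self (by omega) hpr
    rw [pow_two] at hsq
    unfold pvSv at h
    rw [if_pos ⟨by omega, hsq⟩] at h
    omega
  · intro hpr
    unfold pvSv
    rw [if_neg ?_]
    rintro ⟨hle, -⟩
    have := (Nat.prime_def_minFac.mp hpr).2
    omega

lemma pvSpf_test {m : ℕ} (h2 : 2 ≤ m) :
    (m / m.minFac).minFac = m.minFac ↔ m.minFac ∣ m / m.minFac := by
  have hP2 : 2 ≤ m.minFac := (Nat.minFac_prime (by omega)).two_le
  have hR1 : 1 ≤ m / m.minFac := Nat.div_pos (Nat.minFac_le (by omega)) (by omega)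
  constructor
  · intro h
    conv_lhs => rw [← h]
    exact Nat.minFac_dvd _
  · intro h
    have hR2 : 2 ≤ m / m.minFac := by
      rcases Nat.eq_or_lt_of_le hR1 with hR | hR
      · exfalso
        rw [← hR] at h
        have := Nat.dvd_one.mp h
        omega
      · omega
    have hle : (m / m.minFac).minFac ≤ m.minFac := Nat.minFac_le_of_dvd hP2 h
    have hge : m.minFac ≤ (m / m.minFac).minFac :=
      Nat.minFac_le_of_dvd (Nat.minFac_prime (by omega : m / m.minFac ≠ 1)).two_le
        ((Nat.minFac_dvd _).trans (Nat.div_dvd_of_dvd (Nat.minFac_dvd m)))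
    omega

lemma pvMem_pyRange_mult' (i a b x : ℤ) (hi : 0 < i) (ha : i ∣ a) :
    x ∈ PySem.List.pyRange a b i ↔ i ∣ x ∧ a ≤ x ∧ x < b := by
  rw [PySem.List.mem_pyRange_iff_of_pos hi]
  have hiff : i ∣ x - a ↔ i ∣ x :=
    ⟨fun h => by have := dvd_add h ha; simpa using this,
     fun h => dvd_sub h ha⟩
  constructor
  · rintro ⟨h1, h2, h3⟩
    exact ⟨hiff.mp h3, h1, h2⟩
  · rintro ⟨h1, h2, h3⟩
    exact ⟨h2, h3, hiff.mpr h1⟩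

lemma pvSet_get_self (L : List ℤ) (j : ℤ) (h0 : 0 ≤ j) (h1 : j < L.length) :
    PySem.List.pySetD L j (PySem.List.pyGetD L j 0) = L := by
  rw [PySem.List.pySetD_of_nonneg _ _ h0, PySem.List.pyGetD_eq_getElem _ 0 h0 (by simpa using h1)]
  exact List.set_getElem_self (by omega)

lemma pvBSpf (nn : ℕ) : ∀ K, 1 ≤ K → K ≤ nn →
    (PySem.List.pyRange 2 ((K:ℤ)+1) 1).foldl (fun spf p =>
      if PySem.List.pyGetD spf p 0 == p then
        (PySem.List.pyRange (p*p) ((nn:ℤ)+1) p).foldl (fun spf q =>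
          if PySem.List.pyGetD spf q 0 == q then PySem.List.pySetD spf q p else spf) spf
      else spf) ((List.range (nn+1)).map (fun (j : ℕ) => (j : ℤ)))
    = (List.range (nn+1)).map (fun j => ((pvSv K j : ℕ) : ℤ)) := by
  intro K
  induction K with
  | zero => omega
  | succ K ih =>
    intro h1 hK
    by_cases hK1 : 1 ≤ K
    case neg =>
      have hK0 : K = 0 := by omega
      subst hK0
      rw [PySem.List.pyRange_one_eq_nil (by norm_num)]
      rw [List.foldl_nil]
      apply List.map_congr_left
      intro k hk
      simp only [Nat.zero_add]
      rw [pvSv_one]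
    case pos =>
      have hcast : ((K+1 : ℕ) : ℤ) + 1 = ((K:ℤ)+1) + 1 := by push_cast; ring
      rw [hcast]
      rw [PySem.List.pyRange_one_succ_right (a := 2) (b := (K:ℤ)+1) (by omega), List.foldl_append,
        ih hK1 (by omega), List.foldl_cons, List.foldl_nil]
      set i' : ℕ := K + 1 with hi'
      have hiz : ((K:ℤ)+1) = ((i' : ℕ) : ℤ) := by omega
      rw [hiz]
      have hi2 : 2 ≤ i' := by omega
      have htn : ((i' : ℤ)).toNat = i' := by omega
      have hgc : PySem.List.pyGetD ((List.range (nn+1)).map (fun j => ((pvSv K j : ℕ) : ℤ))) (i' : ℤ) 0 = ((pvSv K i' : ℕ) : ℤ) := by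
        simpa [htn] using pvGet_map_range (fun j => ((pvSv K j : ℤ))) (nn+1) (i' : ℤ) (by omega) (by push_cast; omega)
      have hcond : pvSv K i' = i' ↔ i'.Prime := pvSv_cond hi' hi2
      by_cases hpr : i'.Prime
      · have hc : (PySem.List.pyGetD ((List.range (nn+1)).map (fun j => ((pvSv K j : ℕ) : ℤ))) (i' : ℤ) 0 == ((i' : ℕ) : ℤ)) = true := by
          rw [hgc, beq_iff_eq]
          exact_mod_cast hcond.mpr hpr
        rw [if_pos hc]
        rw [pvFold_set_map _ (fun q v => if v == q then ((i' : ℕ) : ℤ) else v) (nn+1)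
          (by
            intro g j hj0 hjN
            simp only []
            rw [pvGet_map_range g _ _ hj0 hjN]
            by_cases hv : (g j.toNat == j) = true
            · rw [if_pos hv, if_pos hv]
            · rw [if_neg hv, if_neg hv,
                ← pvGet_map_range g _ _ hj0 hjN,
                pvSet_get_self _ _ hj0 (by simp; omega)])
          _ _ (pvNodup_pyRange_pos _ _ _ (by omega))
          (by
            intro j hj
            rw [pvMem_pyRange_mult' _ _ _ _ (by omega) (dvd_mul_right _ _)] at hj
            have hsqpos : (0:ℤ) ≤ (i':ℤ) * (i':ℤ) := by positivity
            push_cast at hj ⊢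
            omega)]
        apply List.map_congr_left
        intro k hk
        rw [List.mem_range] at hk
        simp only [pvMem_pyRange_mult' _ _ _ _ (show (0:ℤ) < (i':ℤ) by omega) (dvd_mul_right _ _)]
        split_ifs with hmem hbeq
        · obtain ⟨hdvd, hsq, -⟩ := hmem
          have hdvdN : i' ∣ k := by exact_mod_cast hdvd
          have hsqN : i' * i' ≤ k := by exact_mod_cast hsq
          have h2i : 2 * i' ≤ i' * i' := Nat.mul_le_mul_right i' (by omega)
          have hiltk : i' < k := by omega
          have hkm : k.minFac ≤ i' := Nat.minFac_le_of_dvd (by omega) hdvdN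
          have hksq : k.minFac * k.minFac ≤ k := le_trans (Nat.mul_le_mul hkm hkm) hsqN
          have hmkltk : k.minFac < k := by omega
          have hveq : pvSv K k = k := by exact_mod_cast beq_iff_eq.mp hbeq
          have hcnd : ¬ (k.minFac ≤ K) := by
            intro hcnd
            have : pvSv K k = k.minFac := by unfold pvSv; rw [if_pos ⟨hcnd, hksq⟩]
            omega
          have hmeq : k.minFac = i' := by omega
          have hv' : pvSv i' k = k.minFac := by unfold pvSv; rw [if_pos ⟨by omega, hksq⟩]
          rw [hv', hmeq]
        · obtain ⟨hdvd, hsq, -⟩ := hmem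
          have hdvdN : i' ∣ k := by exact_mod_cast hdvd
          have hsqN : i' * i' ≤ k := by exact_mod_cast hsq
          have h2i : 2 * i' ≤ i' * i' := Nat.mul_le_mul_right i' (by omega)
          have hiltk : i' < k := by omega
          have hkm : k.minFac ≤ i' := Nat.minFac_le_of_dvd (by omega) hdvdN
          have hksq : k.minFac * k.minFac ≤ k := le_trans (Nat.mul_le_mul hkm hkm) hsqN
          have hvne : pvSv K k ≠ k := by
            intro he
            apply hbeq
            rw [he]
            exact beq_self_eq_true _
          have hcnd : k.minFac ≤ K := by
            by_contra hcnd
            exact hvne (by unfold pvSv; rw [if_neg (by omega)])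
          have hv : pvSv K k = k.minFac := by unfold pvSv; rw [if_pos ⟨hcnd, hksq⟩]
          have hv' : pvSv i' k = k.minFac := by unfold pvSv; rw [if_pos ⟨by omega, hksq⟩]
          rw [hv, hv']
        · have hnm : ¬ (i' ∣ k ∧ i' * i' ≤ k) := by
            intro hand
            exact hmem ⟨by exact_mod_cast hand.1, by exact_mod_cast hand.2, by push_cast; omega⟩
          have heq : pvSv i' k = pvSv K k := by
            unfold pvSv
            split_ifs with ha hb hb
            · rfl
            · exfalso
              have hmi : k.minFac = i' := by omega
              refine hnm ⟨?_, ?_⟩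
              · rw [← hmi]; exact Nat.minFac_dvd k
              · rw [← hmi]; exact ha.2
            · omega
            · rfl
          rw [heq]
      · have hc : (PySem.List.pyGetD ((List.range (nn+1)).map (fun j => ((pvSv K j : ℕ) : ℤ))) (i' : ℤ) 0 == ((i' : ℕ) : ℤ)) = false := by
          rw [hgc, beq_eq_false_iff_ne]
          intro he
          exact hpr (hcond.mp (by exact_mod_cast he))
        rw [if_neg (by rw [hc]; simp)]
        apply List.map_congr_left
        intro k hk
        have heq : pvSv i' k = pvSv K k := by
          unfold pvSv
          split_ifs with ha hb hb
          · rfl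
          · exfalso
            have hmi : k.minFac = i' := by omega
            exact hpr (by
              rw [← hmi]
              refine Nat.minFac_prime ?_
              intro hk1
              rw [hk1, Nat.minFac_one] at hmi
              omega)
          · omega
          · rfl
        rw [heq]

lemma pvBPhi (nn : ℕ) : ∀ K, 1 ≤ K → K ≤ nn →
    (PySem.List.pyRange 2 ((K:ℤ)+1) 1).foldl (fun phi m =>
      let p := PySem.List.pyGetD ((List.range (nn+1)).map (fun j => ((pvSv nn j : ℕ) : ℤ))) m 0
      let r := PySem.Int.floordiv m p
      PySem.List.pySetD phi m
        (if PySem.List.pyGetD ((List.range (nn+1)).map (fun j => ((pvSv nn j : ℕ) : ℤ))) r 0 == p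
         then PySem.List.pyGetD phi r 0 * p
         else PySem.List.pyGetD phi r 0 * (p-1)))
      ((List.range (nn+1)).map (fun j => ((pvBg 1 j : ℕ) : ℤ)))
    = (List.range (nn+1)).map (fun j => ((pvBg K j : ℕ) : ℤ)) := by
  intro K
  induction K with
  | zero => omega
  | succ K ih =>
    intro h1 hK
    by_cases hK1 : 1 ≤ K
    case neg =>
      have hK0 : K = 0 := by omega
      subst hK0
      rw [PySem.List.pyRange_one_eq_nil (by norm_num)]
      rw [List.foldl_nil]
    case pos =>
      have hcast : ((K+1 : ℕ) : ℤ) + 1 = ((K:ℤ)+1) + 1 := by push_cast; ring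
      rw [hcast]
      rw [PySem.List.pyRange_one_succ_right (a := 2) (b := (K:ℤ)+1) (by omega), List.foldl_append,
        ih hK1 (by omega), List.foldl_cons, List.foldl_nil]
      set i' : ℕ := K + 1 with hi'
      have hiz : ((K:ℤ)+1) = ((i' : ℕ) : ℤ) := by omega
      rw [hiz]
      have hi2 : 2 ≤ i' := by omega
      have htn : ((i' : ℤ)).toNat = i' := by omega
      have hP2 : 2 ≤ i'.minFac := (Nat.minFac_prime (by omega)).two_le
      have hPle : i'.minFac ≤ i' := Nat.minFac_le (by omega)
      have hR1 : 1 ≤ i' / i'.minFac := Nat.div_pos hPle (by omega)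
      have hRlt : i' / i'.minFac < i' := Nat.div_lt_self (by omega) (by omega)
      have hp : PySem.List.pyGetD ((List.range (nn+1)).map (fun j => ((pvSv nn j : ℕ) : ℤ))) ((i' : ℕ) : ℤ) 0 = ((i'.minFac : ℕ) : ℤ) := by
        have := pvGet_map_range (fun j => ((pvSv nn j : ℤ))) (nn+1) (i' : ℤ) (by omega) (by push_cast; omega)
        rw [this]
        simp only [htn]
        rw [pvSv_final (by omega) (by omega)]
      simp only []
      rw [hp]
      rw [PySem.Int.floordiv_natCast]
      set R : ℕ := i' / i'.minFac with hR
      have hRK : R ≤ K := by omega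
      have hr : PySem.List.pyGetD ((List.range (nn+1)).map (fun j => ((pvSv nn j : ℕ) : ℤ))) ((R : ℕ) : ℤ) 0 = ((R.minFac : ℕ) : ℤ) := by
        have := pvGet_map_range (fun j => ((pvSv nn j : ℤ))) (nn+1) (R : ℤ) (by omega) (by push_cast; omega)
        rw [this]
        have : ((R : ℤ)).toNat = R := by omega
        simp only [this]
        rw [pvSv_final (by omega) (by omega)]
      rw [hr]
      have hphir : PySem.List.pyGetD ((List.range (nn+1)).map (fun j => ((pvBg K j : ℕ) : ℤ))) ((R : ℕ) : ℤ) 0 = ((pvNf R : ℕ) : ℤ) := by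
        have := pvGet_map_range (fun j => ((pvBg K j : ℤ))) (nn+1) (R : ℤ) (by omega) (by push_cast; omega)
        rw [this]
        have h' : ((R : ℤ)).toNat = R := by omega
        simp only [h']
        unfold pvBg
        rw [if_pos ⟨hR1, hRK⟩]
      rw [hphir]
      have hval : (if ((R.minFac : ℕ) : ℤ) == ((i'.minFac : ℕ) : ℤ)
          then ((pvNf R : ℕ) : ℤ) * ((i'.minFac : ℕ) : ℤ)
          else ((pvNf R : ℕ) : ℤ) * (((i'.minFac : ℕ) : ℤ) - 1)) = ((pvNf i' : ℕ) : ℤ) := by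
        by_cases hd : i'.minFac ∣ R
        · rw [if_pos (by rw [beq_iff_eq]; exact_mod_cast (pvSpf_test hi2).mpr hd),
            ← Nat.cast_mul, ← pvNf_rec_dvd hi2 hd]
        · rw [if_neg (by
            intro he
            have he' : R.minFac = i'.minFac := by exact_mod_cast beq_iff_eq.mp he
            exact hd ((pvSpf_test hi2).mp he')
            ), (show ((i'.minFac : ℕ) : ℤ) - 1 = ((i'.minFac - 1 : ℕ) : ℤ) by omega),
            ← Nat.cast_mul, ← pvNf_rec_ndvd hi2 hd]
      rw [hval]
      rw [pvSet_map_range _ _ _ _ (by omega) (by push_cast; omega)]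
      apply List.map_congr_left
      intro k hk
      rw [List.mem_range] at hk
      simp only [htn]
      by_cases hki : k = i'
      · subst hki
        rw [if_pos rfl]
        unfold pvBg
        rw [if_pos ⟨by omega, by omega⟩]
      · rw [if_neg hki]
        unfold pvBg
        split_ifs with ha hb hb
        · rfl
        · omega
        · omega
        · rfl

lemma pvAPhiFinal {nn : ℕ} (hnn : 1 ≤ nn) :
    precalPhi ((nn : ℕ) : ℤ) = (List.range (nn+1)).map (fun j => ((pvNf j : ℕ) : ℤ)) := by
  unfold precalPhi
  have hInit : PySem.List.pyRange 0 ((nn:ℤ)+1) 1 = (List.range (nn+1)).map (fun (j:ℕ) => (j:ℤ)) := by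
    rw [PySem.List.pyRange_one]
    have : (((nn:ℤ)+1) - 0).toNat = nn + 1 := by omega
    rw [this]
    apply List.map_congr_left
    intro k hk
    omega
  rw [hInit, pvAPhase nn nn hnn le_rfl]
  apply List.map_congr_left
  intro k hk
  rw [List.mem_range] at hk
  rw [pvNfk_full (by omega)]

lemma pvBPhiFinal {nn : ℕ} (hnn : 1 ≤ nn) :
    precalAltPhi ((nn : ℕ) : ℤ) = (List.range (nn+1)).map (fun j => ((pvNf j : ℕ) : ℤ)) := by
  unfold precalAltPhi precalAltSpf
  have hInit : PySem.List.pyRange 0 ((nn:ℤ)+1) 1 = (List.range (nn+1)).map (fun (j:ℕ) => (j:ℤ)) := by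
    rw [PySem.List.pyRange_one]
    have : (((nn:ℤ)+1) - 0).toNat = nn + 1 := by omega
    rw [this]
    apply List.map_congr_left
    intro k hk
    omega
  rw [hInit, pvBSpf nn nn hnn le_rfl]
  simp only []
  rw [if_pos (by exact_mod_cast hnn)]
  have hrep : List.replicate (((nn:ℤ)+1)).toNat (0:ℤ) = (List.range (nn+1)).map (fun (_ : ℕ) => (0:ℤ)) := by
    have h1 : (((nn:ℤ)+1)).toNat = nn + 1 := by omega
    rw [h1]
    rw [List.map_const']
    simp
  rw [hrep, pvSet_map_range _ _ _ _ (by omega) (by push_cast; omega)]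
  have hphi1 : (List.range (nn+1)).map (fun k => if k = ((1:ℤ)).toNat then (1:ℤ) else 0) =
      (List.range (nn+1)).map (fun j => ((pvBg 1 j : ℕ) : ℤ)) := by
    apply List.map_congr_left
    intro k hk
    rw [List.mem_range] at hk
    have ht1 : ((1:ℤ)).toNat = 1 := rfl
    rw [ht1]
    by_cases hk1 : k = 1
    · subst hk1
      rw [if_pos rfl]
      unfold pvBg
      rw [if_pos ⟨le_refl _, le_refl _⟩, pvNf_one]
      simp
    · rw [if_neg hk1]
      unfold pvBg
      rw [if_neg (by omega)]
      simp
  rw [hphi1, pvBPhi nn nn hnn le_rfl]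
  apply List.map_congr_left
  intro k hk
  rw [List.mem_range] at hk
  unfold pvBg
  by_cases hk0 : k = 0
  · subst hk0
    rw [if_neg (by omega), pvNf_zero]
  · rw [if_pos ⟨by omega, by omega⟩]

theorem pv_main (n : Int) : precal n = precal_alt n := by
  by_cases hn : 1 ≤ n
  · obtain ⟨nn, rfl⟩ : ∃ nn : ℕ, n = ((nn : ℕ) : ℤ) := ⟨n.toNat, by omega⟩
    have hnn : 1 ≤ nn := by exact_mod_cast hn
    show precal ((nn : ℕ) : ℤ) = precal_alt ((nn : ℕ) : ℤ)
    simp only [precal, precal_alt]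
    rw [pvAPhiFinal hnn, pvBPhiFinal hnn]
  · have h2 : (n:ℤ)+1 ≤ 2 := by omega
    have h1 : (n:ℤ)+1 ≤ 1 := by omega
    simp only [precal, precal_alt, precalPhi, precalAltPhi, precalAltSpf,
      PySem.List.pyRange_one_eq_nil h2, PySem.List.pyRange_one_eq_nil h1,
      List.foldl_nil, if_neg hn]

-- ===== VERDICT (by name: the statement is the Claim_ definition above) =====
theorem precal_spec : Claim_equal_precal := by
  intro n _
  unfold Spec_precal
  exact pv_main n
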